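-- pv_equiv track=rewrite | github.com/mrhenrike/WordListsForHacking | wfh_modules/kwalk_gen.py | _dfs_walk
-- ===== SOURCE A (Python) =====
-- from typing import Generator, Optional
--
-- def _dfs_walk(
--     adj: dict[str, dict[str, str]],
--     start: str,
--     min_len: int,
--     max_len: int,
--     allowed_dirs: set[str],
--     max_changes: int,
-- ) -> Generator[str, None, None]:
--     """DFS-based walk enumeration from a starting character.
--
--     Uses iterative DFS with a stack to avoid recursion depth issues.
--
--     Yields:
--         Walk strings of length [min_len, max_len].
--     """
--     stack: list[tuple[str, str, int]] = [(start, "", 0)]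
--
--     while stack:
--         current_path, last_dir, dir_changes = stack.pop()
--
--         if len(current_path) >= min_len:
--             yield current_path
--
--         if len(current_path) >= max_len:
--             continue
--
--         last_char = current_path[-1]
--         neighbors = adj.get(last_char, {})
--
--         for direction, next_char in neighbors.items():
--             if direction not in allowed_dirs:
--                 continue
--
--             new_changes = dir_changes
--             if last_dir and direction != last_dir:
--                 new_changes += 1
--
--             if new_changes > max_changes:
--                 continue
--
--             stack.append((current_path + next_char, direction, new_changes))
-- ===== SOURCE B (Python) =====
-- from typing import Generator
--
--
-- def _dfs_walk(
--     adj: dict[str, dict[str, str]],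
--     start: str,
--     min_len: int,
--     max_len: int,
--     allowed_dirs: set[str],
--     max_changes: int,
-- ) -> Generator[str, None, None]:
--     """Recursive DFS enumeration of keyboard walks (same output order as the
--     stack-based version: neighbors are explored in reversed insertion order,
--     because a stack pops the last-pushed child first)."""
--
--     def rec(path: str, last_dir: str, changes: int) -> Generator[str, None, None]:
--         if len(path) >= min_len:
--             yield path
--         if len(path) >= max_len:
--             return
--         valid = []
--         for direction, next_char in adj.get(path[-1], {}).items():
--             new_changes = changes + 1 if (last_dir and direction != last_dir) else changes
--             if direction in allowed_dirs and new_changes <= max_changes: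
--                 valid.append((direction, next_char, new_changes))
--         for direction, next_char, new_changes in reversed(valid):
--             yield from rec(path + next_char, direction, new_changes)
--
--     yield from rec(start, "", 0)
-- ===== Notes on version B (the rewrite author's own statement) =====
-- stated objective: simpler
-- what changed: Replaces the explicit stack loop with a recursive generator that collects the valid neighbors into a list and recurses over it in reversed order (a stack pops the last-pushed child first), so the stack bookkeeping disappears.
-- outside the precondition, e.g. on _dfs_walk({'a': {'r': ''}}, 'b', 1, 2, {'r'}, 1): A returns ['b'], B returns ['b']
import Mathlib
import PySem

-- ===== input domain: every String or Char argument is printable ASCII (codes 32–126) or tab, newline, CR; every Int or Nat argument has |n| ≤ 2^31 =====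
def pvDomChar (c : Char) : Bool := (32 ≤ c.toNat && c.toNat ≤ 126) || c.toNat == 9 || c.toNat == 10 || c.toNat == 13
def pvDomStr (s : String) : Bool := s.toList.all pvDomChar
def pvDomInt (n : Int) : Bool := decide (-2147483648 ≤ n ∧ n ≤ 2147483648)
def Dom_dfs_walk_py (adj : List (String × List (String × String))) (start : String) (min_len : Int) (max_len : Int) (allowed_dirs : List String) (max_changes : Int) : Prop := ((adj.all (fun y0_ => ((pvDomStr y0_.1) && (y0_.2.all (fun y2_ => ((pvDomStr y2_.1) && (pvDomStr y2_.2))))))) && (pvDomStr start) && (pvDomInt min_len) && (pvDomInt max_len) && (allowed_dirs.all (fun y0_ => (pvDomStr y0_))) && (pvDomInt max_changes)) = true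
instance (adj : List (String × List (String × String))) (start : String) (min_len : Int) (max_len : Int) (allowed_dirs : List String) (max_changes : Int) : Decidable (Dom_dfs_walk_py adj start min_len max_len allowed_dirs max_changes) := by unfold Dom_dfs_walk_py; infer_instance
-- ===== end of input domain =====

-- B replaces A's explicit stack loop by a recursive DFS over the filtered neighbor list
-- (iterated in reversed order, since a stack pops the last-pushed child first): simpler, same output.

-- ===== PORT A =====
-- Both Pythons receive `adj` as a dict of dicts; this is that value under the association-list convention.
def pvAdjDict (adj : List (String × List (String × String))) : PySem.Dict String (PySem.Dict String String) :=
  PySem.Dict.ofList (adj.map (fun p => (p.1, PySem.Dict.ofList p.2)))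

-- `adj.get(current_path[-1], {}).items()` — the same source line occurs in A and in B.
def pvNbrs (adjD : PySem.Dict String (PySem.Dict String String)) (path : String) : List (String × String) :=
  match PySem.Str.pyGet? path (-1) with
  | none => []       -- Python raises IndexError here; such inputs are excluded by Pre_
  | some c => (adjD.getD (String.ofList [c]) PySem.Dict.empty).items

-- ---- termination support for the stack loop (cited by pvLoopA's decreasing_by) ----
def pvN (adjD : PySem.Dict String (PySem.Dict String String)) : Nat :=
  (adjD.items.map (fun p => p.2.size)).sum

lemma pv_getD_size_le {κ : Type} [BEq κ] (d : PySem.Dict κ (PySem.Dict String String)) (k : κ) :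
    (d.getD k PySem.Dict.empty).size ≤ (d.items.map (fun p => p.2.size)).sum := by
  obtain ⟨items⟩ := d
  induction items with
  | nil => simp [PySem.Dict.getD, PySem.Dict.get?, PySem.Dict.empty, PySem.Dict.size]
  | cons p rest ih =>
    obtain ⟨k0, v0⟩ := p
    simp only [PySem.Dict.getD, PySem.Dict.get?_mk_cons, List.map_cons, List.sum_cons]
    by_cases h : (k0 == k) = true
    · rw [if_pos h]
      simp only [Option.getD_some]
      omega
    · rw [if_neg h]
      simp only [PySem.Dict.getD] at ih
      omega

def pvMeasure (N : Nat) (st : List (String × String × Int × Nat)) : Nat :=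
  (st.map (fun it => (N + 1) ^ it.2.2.2)).sum

lemma pvNbrs_length_le (adjD : PySem.Dict String (PySem.Dict String String)) (path : String) :
    (pvNbrs adjD path).length ≤ pvN adjD := by
  unfold pvNbrs pvN
  cases PySem.Str.pyGet? path (-1) with
  | none => simp
  | some c => exact pv_getD_size_le adjD (String.ofList [c])

-- The body of A's push loop, named (`stack.append` is a cons in the top-at-head model).
def pvPush (allowed : List String) (maxch : Int) (path lastd : String) (ch : Int) (b' : Nat)
    (st : List (String × String × Int × Nat)) (dc : String × String) :
    List (String × String × Int × Nat) :=
  if dc.1 ∈ allowed then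
    let nc := if lastd ≠ "" ∧ dc.1 ≠ lastd then ch + 1 else ch
    if nc ≤ maxch then (path ++ dc.2, dc.1, nc, b') :: st else st
  else st

-- The same body as an Option-valued filter (for the termination bound and the proofs).
def pvKidsF (allowed : List String) (maxch : Int) (path lastd : String) (ch : Int) (b' : Nat) :
    (String × String) → Option (String × String × Int × Nat) :=
  fun dc =>
    if dc.1 ∈ allowed then
      let nc := if lastd ≠ "" ∧ dc.1 ≠ lastd then ch + 1 else ch
      if nc ≤ maxch then some (path ++ dc.2, dc.1, nc, b') else none
    else none

lemma pv_foldl_pvPush (allowed : List String) (maxch : Int) (path lastd : String) (ch : Int)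
    (b' : Nat) (l : List (String × String)) (init : List (String × String × Int × Nat)) :
    l.foldl (pvPush allowed maxch path lastd ch b') init
      = (l.filterMap (pvKidsF allowed maxch path lastd ch b')).reverse ++ init := by
  induction l generalizing init with
  | nil => simp
  | cons x l ih =>
    simp only [List.foldl_cons, List.filterMap_cons]
    have hx : pvPush allowed maxch path lastd ch b' init x
        = match pvKidsF allowed maxch path lastd ch b' x with
          | some y => y :: init | none => init := by
      simp only [pvPush, pvKidsF]
      split_ifs <;> rfl
    rw [hx]
    cases h : pvKidsF allowed maxch path lastd ch b' x <;> simp [ih]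

lemma pv_measure_push (allowed : List String) (maxch : Int) (path lastd : String) (ch : Int)
    (b' N : Nat) (l : List (String × String)) (hl : l.length ≤ N)
    (rest : List (String × String × Int × Nat)) :
    pvMeasure N ((l.filterMap (pvKidsF allowed maxch path lastd ch b')).reverse ++ rest)
      < pvMeasure N ((path, lastd, ch, Nat.succ b') :: rest) := by
  have hb : ∀ y ∈ l.filterMap (pvKidsF allowed maxch path lastd ch b'), y.2.2.2 = b' := by
    intro y hy
    rcases List.mem_filterMap.mp hy with ⟨x, -, hx⟩
    simp only [pvKidsF] at hx
    split_ifs at hx <;> (injection hx with h; exact h ▸ rfl)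
  have hmapc : (l.filterMap (pvKidsF allowed maxch path lastd ch b')).map
        (fun it => (N + 1) ^ it.2.2.2)
      = (l.filterMap (pvKidsF allowed maxch path lastd ch b')).map (fun _ => (N + 1) ^ b') :=
    List.map_congr_left (fun y hy => by rw [hb y hy])
  have hmk : pvMeasure N ((l.filterMap (pvKidsF allowed maxch path lastd ch b')).reverse)
      = (l.filterMap (pvKidsF allowed maxch path lastd ch b')).length * (N + 1) ^ b' := by
    unfold pvMeasure
    rw [List.map_reverse, List.sum_reverse, hmapc]
    simp only [List.map_const', List.sum_replicate, smul_eq_mul]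
  have happ : ∀ (u v : List (String × String × Int × Nat)),
      pvMeasure N (u ++ v) = pvMeasure N u + pvMeasure N v := by
    intro u v
    unfold pvMeasure
    rw [List.map_append, List.sum_append]
  have hcons : pvMeasure N ((path, lastd, ch, Nat.succ b') :: rest)
      = (N + 1) ^ b' * (N + 1) + pvMeasure N rest := by
    unfold pvMeasure
    rw [List.map_cons, List.sum_cons, pow_succ]
  have hklen : (l.filterMap (pvKidsF allowed maxch path lastd ch b')).length ≤ N :=
    le_trans (List.length_filterMap_le _ _) hl
  have hpow : 0 < (N + 1) ^ b' := pow_pos (by omega) b'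
  have hlt : (l.filterMap (pvKidsF allowed maxch path lastd ch b')).length * (N + 1) ^ b'
      < (N + 1) ^ b' * (N + 1) := by
    calc (l.filterMap (pvKidsF allowed maxch path lastd ch b')).length * (N + 1) ^ b'
        ≤ N * (N + 1) ^ b' := Nat.mul_le_mul_right _ hklen
      _ < (N + 1) * (N + 1) ^ b' := (Nat.mul_lt_mul_right hpow).mpr (by omega)
      _ = (N + 1) ^ b' * (N + 1) := Nat.mul_comm _ _
  rw [happ, hmk, hcons]
  omega

-- A's stack loop, stack modelled top-at-head (Python pops from the end, so an append is a cons).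
-- Each item carries a budget (max_len minus the path length at push time); the `0 => stop` arm only
-- makes the recursion total — under Pre_ the budget reaches 0 exactly when `len(path) >= max_len`.
def pvLoopA (adjD : PySem.Dict String (PySem.Dict String String)) (minl maxl : Int)
    (allowed : List String) (maxch : Int) : List (String × String × Int × Nat) → List String
  | [] => []
  | (path, lastd, ch, b) :: rest =>
    let hd := if minl ≤ PySem.Str.len path then [path] else []
    if maxl ≤ PySem.Str.len path then hd ++ pvLoopA adjD minl maxl allowed maxch rest
    else match b with
      | 0 => hd ++ pvLoopA adjD minl maxl allowed maxch rest
      | Nat.succ b' =>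
        hd ++ pvLoopA adjD minl maxl allowed maxch
          ((pvNbrs adjD path).foldl (pvPush allowed maxch path lastd ch b') rest)
  termination_by st => pvMeasure (pvN adjD) st
  decreasing_by
  · simp only [pvMeasure, List.map_cons, List.sum_cons]
    have := pow_pos (show 0 < pvN adjD + 1 by omega) b
    omega
  · simp only [pvMeasure, List.map_cons, List.sum_cons, pow_zero]
    omega
  · rw [pv_foldl_pvPush]
    exact pv_measure_push allowed maxch path lastd ch b' (pvN adjD) _
      (pvNbrs_length_le adjD path) rest

def dfs_walk_py (adj : List (String × List (String × String))) (start : String) (min_len : Int)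
    (max_len : Int) (allowed_dirs : List String) (max_changes : Int) : List String :=
  pvLoopA (pvAdjDict adj) min_len max_len allowed_dirs max_changes
    [(start, "", 0, (max_len - PySem.Str.len start).toNat)]

-- ===== PORT B =====
-- B's recursive generator `rec(path, last_dir, changes)`: yield, stop at max_len, filter the
-- neighbors into `valid`, recurse over `reversed(valid)`. Budget as in port A (totality only).
def pvRecB (adjD : PySem.Dict String (PySem.Dict String String)) (minl maxl : Int)
    (allowed : List String) (maxch : Int) (b : Nat) (path lastd : String) (ch : Int) : List String :=
  let hd := if minl ≤ PySem.Str.len path then [path] else []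
  if maxl ≤ PySem.Str.len path then hd
  else match b with
    | 0 => hd
    | Nat.succ b' =>
      let valid := (pvNbrs adjD path).filterMap (fun dc =>
        let nc := if lastd ≠ "" ∧ dc.1 ≠ lastd then ch + 1 else ch
        if dc.1 ∈ allowed ∧ nc ≤ maxch then some (dc.1, dc.2, nc) else none)
      hd ++ valid.reverse.flatMap
        (fun t => pvRecB adjD minl maxl allowed maxch b' (path ++ t.2.1) t.1 t.2.2)
  termination_by b

def dfs_walk_py_alt (adj : List (String × List (String × String))) (start : String) (min_len : Int)
    (max_len : Int) (allowed_dirs : List String) (max_changes : Int) : List String :=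
  pvRecB (pvAdjDict adj) min_len max_len allowed_dirs max_changes
    (max_len - PySem.Str.len start).toNat start "" 0

-- ===== PRECONDITION & SPEC =====
-- Pre_ excludes (a) an empty start with max_len > 0, where both programs raise IndexError on
-- current_path[-1], and (b) inputs that can ever expand a walk and whose adjacency maps some
-- single-character key through an allowed direction to an empty string, on which A's stack loop
-- stops making progress and diverges whenever such an entry is reachable (when it is unreachable
-- A still returns, so Pre_ is slightly narrower than its reason there — see the cite).
def Pre_dfs_walk_py (adj : List (String × List (String × String))) (start : String) (min_len : Int)
    (max_len : Int) (allowed_dirs : List String) (max_changes : Int) : Prop :=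
  (start ≠ "" ∨ max_len ≤ 0) ∧
  (max_len ≤ PySem.Str.len start ∨ max_changes < 0 ∨
    ∀ p ∈ adj, PySem.Str.len p.1 = 1 → ∀ q ∈ p.2, q.1 ∈ allowed_dirs → q.2 ≠ "")
instance (adj : List (String × List (String × String))) (start : String) (min_len : Int) (max_len : Int) (allowed_dirs : List String) (max_changes : Int) : Decidable (Pre_dfs_walk_py adj start min_len max_len allowed_dirs max_changes) := by unfold Pre_dfs_walk_py; infer_instance

def pvWitness_dfs_walk_py : (List (String × List (String × String))) × String × Int × Int × List String × Int :=
  ([("a", [("r", "b")]), ("b", [("l", "a")])], "a", 1, 3, ["r", "l"], 1)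

def Spec_dfs_walk_py (adj : List (String × List (String × String))) (start : String) (min_len : Int) (max_len : Int) (allowed_dirs : List String) (max_changes : Int) (out : List String) : Prop := out = dfs_walk_py_alt adj start min_len max_len allowed_dirs max_changes
instance (adj : List (String × List (String × String))) (start : String) (min_len : Int) (max_len : Int) (allowed_dirs : List String) (max_changes : Int) (out : List String) : Decidable (Spec_dfs_walk_py adj start min_len max_len allowed_dirs max_changes out) := by unfold Spec_dfs_walk_py; infer_instance

-- ===== CLAIM (what is proved, stated in full; the proofs are below) =====
def Claim_equal_dfs_walk_py : Prop := ∀ (adj : List (String × List (String × String))) (start : String) (min_len : Int) (max_len : Int) (allowed_dirs : List String) (max_changes : Int), Dom_dfs_walk_py adj start min_len max_len allowed_dirs max_changes → Pre_dfs_walk_py adj start min_len max_len allowed_dirs max_changes → Spec_dfs_walk_py adj start min_len max_len allowed_dirs max_changes (dfs_walk_py adj start min_len max_len allowed_dirs max_changes)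

-- ===== LEMMAS AND PROOFS =====
lemma pvLoopA_nil (adjD : PySem.Dict String (PySem.Dict String String)) (minl maxl : Int)
    (allowed : List String) (maxch : Int) : pvLoopA adjD minl maxl allowed maxch [] = [] := by
  simp [pvLoopA]

-- One popped stack item produces exactly the output of B's recursive call on it, followed by the
-- output of the rest of the stack.
lemma pvMain (adjD : PySem.Dict String (PySem.Dict String String)) (minl maxl : Int)
    (allowed : List String) (maxch : Int) :
    ∀ (b : Nat) (path lastd : String) (ch : Int) (rest : List (String × String × Int × Nat)),
      pvLoopA adjD minl maxl allowed maxch ((path, lastd, ch, b) :: rest)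
        = pvRecB adjD minl maxl allowed maxch b path lastd ch
            ++ pvLoopA adjD minl maxl allowed maxch rest := by
  intro b
  induction b with
  | zero =>
    intro path lastd ch rest
    simp only [pvLoopA, pvRecB]
    split_ifs <;> simp
  | succ b' ih =>
    intro path lastd ch rest
    simp only [pvLoopA, pvRecB]
    by_cases hm : maxl ≤ PySem.Str.len path
    · rw [if_pos hm, if_pos hm]
    · rw [if_neg hm, if_neg hm, pv_foldl_pvPush]
      have hmap : (pvNbrs adjD path).filterMap (pvKidsF allowed maxch path lastd ch b')
          = ((pvNbrs adjD path).filterMap (fun dc =>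
              if dc.1 ∈ allowed ∧ (if lastd ≠ "" ∧ dc.1 ≠ lastd then ch + 1 else ch) ≤ maxch
              then some (dc.1, dc.2, if lastd ≠ "" ∧ dc.1 ≠ lastd then ch + 1 else ch)
              else none)).map (fun t => (path ++ t.2.1, t.1, t.2.2, b')) := by
        rw [List.map_filterMap]
        apply List.filterMap_congr
        intro dc _
        by_cases hA : dc.1 ∈ allowed <;>
          by_cases hB : (if lastd ≠ "" ∧ dc.1 ≠ lastd then ch + 1 else ch) ≤ maxch <;>
          simp [pvKidsF, hA, hB]
      rw [hmap, ← List.map_reverse]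
      have hstep : ∀ (vs : List (String × String × Int))
          (rest2 : List (String × String × Int × Nat)),
          pvLoopA adjD minl maxl allowed maxch
              ((vs.map (fun t => (path ++ t.2.1, t.1, t.2.2, b'))) ++ rest2)
            = vs.flatMap (fun t => pvRecB adjD minl maxl allowed maxch b' (path ++ t.2.1) t.1 t.2.2)
                ++ pvLoopA adjD minl maxl allowed maxch rest2 := by
        intro vs
        induction vs with
        | nil => simp
        | cons t vs ihv =>
          intro rest2
          simp only [List.map_cons, List.cons_append, List.flatMap_cons]
          rw [ih (path ++ t.2.1) t.1 t.2.2 _, ihv]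
          simp [List.append_assoc]
      rw [hstep]
      simp [List.append_assoc]

-- ===== VERDICT (by name: the statement is the Claim_ definition above) =====
theorem dfs_walk_py_spec : Claim_equal_dfs_walk_py := by
  intro adj start _min_len max_len allowed_dirs max_changes _ _
  unfold Spec_dfs_walk_py dfs_walk_py dfs_walk_py_alt
  rw [pvMain, pvLoopA_nil, List.append_nil]
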